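-- pv_equiv track=rewrite | github.com/Sekyiwaa/PYTHON-PRACTISE | Hard/Matrix Multiplication-AMAZON.py | create_block_matrix
-- ===== SOURCE A (Python) =====
-- def create_block_matrix(toeplitz_matrices, di):
--     h, w = len(toeplitz_matrices[0]), len(toeplitz_matrices[0][0])
--     di_h, di_w = len(di), len(di[0])
--     block_matrix = [[0 for _ in range(w * di_w)] for _ in range(h * di_h)]
--
--     for i in range(di_h):
--         for j in range(di_w):
--             i0 = i * h
--             j0 = j * w
--             i1 = i0 + h
--             j1 = j0 + w
--             matrix_index = int(di[i][j]) - 1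
--             for mi in range(h):
--                 for mj in range(w):
--                     block_matrix[i0 + mi][j0 + mj] = toeplitz_matrices[matrix_index][mi][mj]
--     return block_matrix
-- ===== SOURCE B (Python) =====
-- # B: build the result row by row (flat comprehension, no preallocated zero grid); objective: simpler.
-- def create_block_matrix(toeplitz_matrices, di):
--     h = len(toeplitz_matrices[0])
--     w = len(toeplitz_matrices[0][0])
--     dw = len(di[0])
--     return [[toeplitz_matrices[int(v) - 1][mi][mj] for v in drow[:dw] for mj in range(w)]
--             for drow in di for mi in range(h)]
-- ===== Notes on version B (the rewrite author's own statement) =====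
-- stated objective: simpler
-- what changed: B builds the result row by row as one flat comprehension (concatenating the mi-th rows of the selected blocks), instead of preallocating an h*di_h x w*di_w zero grid and overwriting it cell by cell with four nested index loops.
import Mathlib
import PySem

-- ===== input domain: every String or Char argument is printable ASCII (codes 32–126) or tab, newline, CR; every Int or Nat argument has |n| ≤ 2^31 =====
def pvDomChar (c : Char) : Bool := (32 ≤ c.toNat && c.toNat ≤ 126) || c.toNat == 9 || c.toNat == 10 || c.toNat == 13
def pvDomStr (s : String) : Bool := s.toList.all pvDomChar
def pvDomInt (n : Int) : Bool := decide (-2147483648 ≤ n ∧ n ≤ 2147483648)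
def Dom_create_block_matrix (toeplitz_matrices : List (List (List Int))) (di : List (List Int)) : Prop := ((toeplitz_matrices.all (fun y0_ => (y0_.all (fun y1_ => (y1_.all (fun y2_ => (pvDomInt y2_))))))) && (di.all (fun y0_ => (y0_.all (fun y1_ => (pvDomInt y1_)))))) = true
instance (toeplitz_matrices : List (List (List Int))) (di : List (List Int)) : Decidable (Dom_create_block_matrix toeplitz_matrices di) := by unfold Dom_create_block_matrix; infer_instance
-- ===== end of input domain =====

-- B assembles the output row by row with a flat comprehension instead of writing cells into a
-- preallocated zero grid; objective: simpler.

-- ===== PORT A =====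
-- literal transliteration of A: zero grid, then four nested index loops writing one cell at a time
def create_block_matrix (toeplitz_matrices : List (List (List Int))) (di : List (List Int)) : List (List Int) :=
  let h := (toeplitz_matrices.headD []).length
  let w := ((toeplitz_matrices.headD []).headD []).length
  let di_h := di.length
  let di_w := (di.headD []).length
  let block_matrix : List (List Int) := List.replicate (h * di_h) (List.replicate (w * di_w) (0 : Int))
  (List.range di_h).foldl (fun bm i =>
    (List.range di_w).foldl (fun bm j =>
      let i0 := i * h
      let j0 := j * w
      let matrix_index : Int := (di.getD i []).getD j 0 - 1
      (List.range h).foldl (fun bm mi =>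
        (List.range w).foldl (fun bm mj =>
          bm.set (i0 + mi) ((bm.getD (i0 + mi) []).set (j0 + mj)
            (((PySem.List.pyGetD toeplitz_matrices matrix_index []).getD mi []).getD mj 0))) bm) bm) bm)
    block_matrix

-- ===== PORT B =====
-- literal transliteration of Source B's flat comprehension (drow[:dw] is List.take dw, a nonnegative-bound slice)
def create_block_matrix_alt (toeplitz_matrices : List (List (List Int))) (di : List (List Int)) : List (List Int) :=
  let h := (toeplitz_matrices.headD []).length
  let w := ((toeplitz_matrices.headD []).headD []).length
  let dw := (di.headD []).length
  di.flatMap (fun drow =>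
    (List.range h).map (fun mi =>
      (drow.take dw).flatMap (fun v =>
        (List.range w).map (fun mj =>
          ((PySem.List.pyGetD toeplitz_matrices (v - 1) []).getD mi []).getD mj 0))))

-- ===== PRECONDITION & SPEC =====
-- Pre_ is exactly where the Python A returns: it excludes only inputs on which A raises an
-- IndexError (empty toeplitz_matrices / first block / di, a di row shorter than the first one,
-- a block index out of Python's range, or a selected block too small for the h×w window).
def Pre_create_block_matrix (toeplitz_matrices : List (List (List Int))) (di : List (List Int)) : Prop :=
  toeplitz_matrices ≠ [] ∧ toeplitz_matrices.headD [] ≠ [] ∧ di ≠ [] ∧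
  (∀ row ∈ di, (di.headD []).length ≤ row.length) ∧
  (((toeplitz_matrices.headD []).headD []).length = 0 ∨
    ∀ row ∈ di, ∀ v ∈ row.take (di.headD []).length,
      (-(toeplitz_matrices.length : Int) ≤ v - 1 ∧ v - 1 < (toeplitz_matrices.length : Int)) ∧
      (toeplitz_matrices.headD []).length ≤ (PySem.List.pyGetD toeplitz_matrices (v - 1) []).length ∧
      ∀ r ∈ (PySem.List.pyGetD toeplitz_matrices (v - 1) []).take (toeplitz_matrices.headD []).length,
        ((toeplitz_matrices.headD []).headD []).length ≤ r.length)
instance (toeplitz_matrices : List (List (List Int))) (di : List (List Int)) : Decidable (Pre_create_block_matrix toeplitz_matrices di) := by unfold Pre_create_block_matrix; infer_instance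

def pvWitness_create_block_matrix : List (List (List Int)) × List (List Int) :=
  ([[[1, 2], [3, 4]], [[5, 6], [7, 8]]], [[1, 2], [2, 1]])

def Spec_create_block_matrix (toeplitz_matrices : List (List (List Int))) (di : List (List Int)) (out : List (List Int)) : Prop := out = create_block_matrix_alt toeplitz_matrices di
instance (toeplitz_matrices : List (List (List Int))) (di : List (List Int)) (out : List (List Int)) : Decidable (Spec_create_block_matrix toeplitz_matrices di out) := by unfold Spec_create_block_matrix; infer_instance

-- ===== CLAIM (what is proved, stated in full; the proofs are below) =====
def Claim_equal_create_block_matrix : Prop := ∀ (toeplitz_matrices : List (List (List Int))) (di : List (List Int)), Dom_create_block_matrix toeplitz_matrices di → Pre_create_block_matrix toeplitz_matrices di → Spec_create_block_matrix toeplitz_matrices di (create_block_matrix toeplitz_matrices di)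

-- ===== LEMMAS AND PROOFS =====

-- the value that ends up at block (i,j), offset (mi,mj)
def pvCell (T : List (List (List Int))) (di : List (List Int)) (i j mi mj : Nat) : Int :=
  ((PySem.List.pyGetD T ((di.getD i []).getD j 0 - 1) []).getD mi []).getD mj 0

-- one cell assignment 'bm[r][c] = v' and the flattened assignment list of A's four loops
def pvPut (G : List (List Int)) (a : Nat × Nat × Int) : List (List Int) :=
  G.set a.1 ((G.getD a.1 []).set a.2.1 a.2.2)

def pvAsgs (T : List (List (List Int))) (di : List (List Int)) (h w dh dw : Nat) : List (Nat × Nat × Int) :=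
  (List.range dh).flatMap (fun i =>
    (List.range dw).flatMap (fun j =>
      (List.range h).flatMap (fun mi =>
        (List.range w).map (fun mj => (i * h + mi, j * w + mj, pvCell T di i j mi mj)))))

def pvGcell (G : List (List Int)) (r c : Nat) : Int := (G.getD r []).getD c 0

-- the common canonical grid
def pvCanon (T : List (List (List Int))) (di : List (List Int)) (h w dh dw : Nat) : List (List Int) :=
  (List.range (dh * h)).map (fun r =>
    (List.range (dw * w)).map (fun c => pvCell T di (r / h) (c / w) (r % h) (c % w)))

lemma pvPut_length (G : List (List Int)) (a : Nat × Nat × Int) : (pvPut G a).length = G.length := by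
  simp [pvPut]

lemma pvPut_row_length (G : List (List Int)) (a : Nat × Nat × Int) (r : Nat) :
    ((pvPut G a).getD r []).length = (G.getD r []).length := by
  rcases a with ⟨r0, c0, v⟩
  simp only [pvPut, List.getD]
  rw [List.getElem?_set]
  split_ifs with h1 h2
  · subst h1; simp [List.getElem?_eq_getElem h2]
  · rw [List.getElem?_eq_none (by omega)]
  · rfl

lemma pvFold_length (L : List (Nat × Nat × Int)) (G : List (List Int)) :
    (L.foldl pvPut G).length = G.length := by
  induction L generalizing G with
  | nil => rfl
  | cons a L ih => rw [List.foldl_cons, ih, pvPut_length]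

lemma pvFold_row_length (L : List (Nat × Nat × Int)) (G : List (List Int)) (r : Nat) :
    ((L.foldl pvPut G).getD r []).length = (G.getD r []).length := by
  induction L generalizing G with
  | nil => rfl
  | cons a L ih => rw [List.foldl_cons, ih, pvPut_row_length]

lemma pvGcell_put (G : List (List Int)) (r0 c0 : Nat) (v : Int) (r c : Nat) :
    pvGcell (pvPut G (r0, c0, v)) r c =
      if r = r0 ∧ c = c0 ∧ r0 < G.length ∧ c0 < (G.getD r0 []).length then v else pvGcell G r c := by
  simp only [pvGcell, pvPut, List.getD]
  rw [List.getElem?_set]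
  by_cases h1 : r0 = r
  · subst h1
    by_cases h2 : r0 < G.length
    · by_cases h3 : c = c0
      · subst h3
        by_cases h4 : c < (G[r0]?.getD []).length
        · have h4' : c < G[r0].length := by rwa [List.getElem?_eq_getElem h2] at h4
          simp [h2, h4']
        · have h4' : ¬ c < G[r0].length := by rwa [List.getElem?_eq_getElem h2] at h4
          rw [List.set_eq_of_length_le (Nat.le_of_not_lt h4)]
          simp [h2, h4']
      · simp [h2, h3, show ¬ (c0 = c) from fun h => h3 h.symm]
    · simp [h2]
  · simp [h1, show ¬ (r = r0) from fun h => h1 h.symm]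

-- cell (r,c) after all assignments: any in-bounds assignment to (r,c) in L carries the value v
lemma pvGcell_fold (L : List (Nat × Nat × Int)) (G : List (List Int)) (r c : Nat) (v : Int)
    (hmem : (r, c, v) ∈ L)
    (huniq : ∀ p ∈ L, p.1 = r → p.2.1 = c → p.2.2 = v)
    (hr : r < G.length) (hc : c < (G.getD r []).length) :
    pvGcell (L.foldl pvPut G) r c = v := by
  revert hmem huniq
  induction L using List.reverseRecOn with
  | nil => intro hmem _; simp at hmem
  | append_singleton L a ih =>
    intro hmem huniq
    rcases a with ⟨r1, c1, v1⟩
    rw [List.foldl_append, List.foldl_cons, List.foldl_nil, pvGcell_put]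
    by_cases hp : r = r1 ∧ c = c1
    · have hv : v1 = v := huniq (r1, c1, v1) (by simp) hp.1.symm hp.2.symm
      rw [if_pos ⟨hp.1, hp.2, by rw [pvFold_length]; omega,
        by rw [pvFold_row_length, ← hp.1]; omega⟩, hv]
    · rw [if_neg (fun h => hp ⟨h.1, h.2.1⟩)]
      apply ih
      · rcases List.mem_append.mp hmem with h | h
        · exact h
        · exfalso; simp at h; exact hp ⟨h.1, h.2.1⟩
      · intro p hpL; exact huniq p (List.mem_append_left _ hpL)

-- A's nested loops are the fold of the flattened assignment list
lemma pvA_as_fold (T : List (List (List Int))) (di : List (List Int)) :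
    create_block_matrix T di =
      (pvAsgs T di (T.headD []).length ((T.headD []).headD []).length di.length (di.headD []).length).foldl
        pvPut
        (List.replicate ((T.headD []).length * di.length)
          (List.replicate (((T.headD []).headD []).length * (di.headD []).length) (0 : Int))) := by
  simp only [create_block_matrix, pvAsgs, pvCell, pvPut, List.foldl_flatMap, List.foldl_map]

-- nested range iteration flattened to a single range with divmod
lemma pvFlatMap_range_mul {α : Type} (n k : Nat) (g : Nat → Nat → α) :
    (List.range n).flatMap (fun i => (List.range k).map (fun m => g i m)) =
      (List.range (n * k)).map (fun r => g (r / k) (r % k)) := by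
  rcases Nat.eq_zero_or_pos k with hk | hk
  · subst hk; simp
  · induction n with
    | zero => simp
    | succ n ih =>
      rw [List.range_succ, List.flatMap_append, ih, show (n + 1) * k = n * k + k by ring,
        List.range_add, List.map_append, List.flatMap_singleton, List.map_map]
      congr 1
      apply List.map_congr_left
      intro m hm
      rw [List.mem_range] at hm
      simp only [Function.comp]
      rw [Nat.add_comm, Nat.add_mul_div_right _ _ hk, Nat.div_eq_of_lt hm, Nat.zero_add,
        Nat.add_mul_mod_self_right, Nat.mod_eq_of_lt hm]

-- the flattened fold equals the canonical grid
lemma pvFold_canon (T : List (List (List Int))) (di : List (List Int)) (h w dh dw : Nat) :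
    (pvAsgs T di h w dh dw).foldl pvPut
        (List.replicate (h * dh) (List.replicate (w * dw) (0 : Int))) = pvCanon T di h w dh dw := by
  apply List.ext_getElem
  · rw [pvFold_length, List.length_replicate]; simp [pvCanon, Nat.mul_comm]
  intro r h1 h2
  have hr : r < h * dh := by rwa [pvFold_length, List.length_replicate] at h1
  have hrowlen : (((pvAsgs T di h w dh dw).foldl pvPut
      (List.replicate (h * dh) (List.replicate (w * dw) (0 : Int)))).getD r []).length = w * dw := by
    rw [pvFold_row_length, List.getD_eq_getElem _ _ (by simpa using hr), List.getElem_replicate,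
      List.length_replicate]
  apply List.ext_getElem
  · rw [← List.getD_eq_getElem _ ([]) h1, hrowlen]; simp [pvCanon, Nat.mul_comm]
  intro c hc1 hc2
  have hcb : c < w * dw := by rwa [← List.getD_eq_getElem _ ([]) h1, hrowlen] at hc1
  have hpos_h : 0 < h := Nat.pos_of_ne_zero (by rintro rfl; simp at hr)
  have hpos_w : 0 < w := Nat.pos_of_ne_zero (by rintro rfl; simp at hcb)
  have hmem : (r, c, pvCell T di (r / h) (c / w) (r % h) (c % w)) ∈ pvAsgs T di h w dh dw := by
    simp only [pvAsgs, List.mem_flatMap, List.mem_map, List.mem_range]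
    refine ⟨r / h, by rwa [Nat.div_lt_iff_lt_mul hpos_h, Nat.mul_comm],
      c / w, by rwa [Nat.div_lt_iff_lt_mul hpos_w, Nat.mul_comm],
      r % h, Nat.mod_lt _ hpos_h,
      c % w, Nat.mod_lt _ hpos_w, ?_⟩
    simp [Nat.div_add_mod']
  have huniq : ∀ p ∈ pvAsgs T di h w dh dw, p.1 = r → p.2.1 = c →
      p.2.2 = pvCell T di (r / h) (c / w) (r % h) (c % w) := by
    intro p hp hpr hpc
    simp only [pvAsgs, List.mem_flatMap, List.mem_map, List.mem_range] at hp
    obtain ⟨i, hi, j, hj, mi, hmi, mj, hmj, rfl⟩ := hp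
    simp only at hpr hpc ⊢
    have e1 : r / h = i := by
      rw [← hpr, Nat.add_comm, Nat.add_mul_div_right _ _ hpos_h, Nat.div_eq_of_lt hmi,
        Nat.zero_add]
    have e2 : r % h = mi := by
      rw [← hpr, Nat.add_comm, Nat.add_mul_mod_self_right, Nat.mod_eq_of_lt hmi]
    have e3 : c / w = j := by
      rw [← hpc, Nat.add_comm, Nat.add_mul_div_right _ _ hpos_w, Nat.div_eq_of_lt hmj,
        Nat.zero_add]
    have e4 : c % w = mj := by
      rw [← hpc, Nat.add_comm, Nat.add_mul_mod_self_right, Nat.mod_eq_of_lt hmj]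
    rw [e1, e2, e3, e4]
  have hfold := pvGcell_fold (pvAsgs T di h w dh dw)
      (List.replicate (h * dh) (List.replicate (w * dw) (0 : Int))) r c
      (pvCell T di (r / h) (c / w) (r % h) (c % w)) hmem huniq
      (by simpa using hr)
      (by rw [List.getD_eq_getElem _ _ (by simpa using hr), List.getElem_replicate,
            List.length_replicate]; exact hcb)
  have hL : ((pvAsgs T di h w dh dw).foldl pvPut
      (List.replicate (h * dh) (List.replicate (w * dw) (0 : Int))))[r][c] =
      pvGcell ((pvAsgs T di h w dh dw).foldl pvPut
        (List.replicate (h * dh) (List.replicate (w * dw) (0 : Int)))) r c := by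
    rw [pvGcell, List.getD_eq_getElem _ _ h1, List.getD_eq_getElem _ _ hc1]
  rw [hL, hfold]
  simp [pvCanon]

-- A equals the canonical grid, unconditionally
lemma pvA_char (T : List (List (List Int))) (di : List (List Int)) :
    create_block_matrix T di =
      pvCanon T di (T.headD []).length ((T.headD []).headD []).length di.length (di.headD []).length := by
  rw [pvA_as_fold, pvFold_canon]

-- list iteration as index iteration
lemma pvFlatMap_index {α β : Type} (l : List α) (d : α) (f : α → List β) :
    l.flatMap f = (List.range l.length).flatMap (fun i => f (l.getD i d)) := by
  induction l with
  | nil => simp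
  | cons x xs ih =>
    rw [List.flatMap_cons, List.length_cons, List.range_succ_eq_map, List.flatMap_cons,
      List.flatMap_map]
    simp only [List.getD_cons_zero, List.getD_cons_succ]
    rw [ih]

lemma pvTake_eq_range_map (row : List Int) (dw : Nat) (hle : dw ≤ row.length) :
    row.take dw = (List.range dw).map (fun j => row.getD j 0) := by
  apply List.ext_getElem
  · simp [Nat.min_eq_left hle]
  intro j h1 h2
  simp only [List.getElem_take, List.getElem_map, List.getElem_range]
  rw [List.getD_eq_getElem _ _ (by simp at h1; omega)]

-- B equals the canonical grid on Pre_
lemma pvB_char (T : List (List (List Int))) (di : List (List Int))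
    (hrows : ∀ row ∈ di, (di.headD []).length ≤ row.length) :
    create_block_matrix_alt T di =
      pvCanon T di (T.headD []).length ((T.headD []).headD []).length di.length (di.headD []).length := by
  simp only [create_block_matrix_alt]
  rw [pvFlatMap_index di []]
  have step : ∀ i ∈ List.range di.length,
      (List.range (T.headD []).length).map (fun mi =>
        ((di.getD i []).take (di.headD []).length).flatMap (fun v =>
          (List.range ((T.headD []).headD []).length).map (fun mj =>
            ((PySem.List.pyGetD T (v - 1) []).getD mi []).getD mj 0))) =
      (List.range (T.headD []).length).map (fun mi =>
        (List.range ((di.headD []).length * ((T.headD []).headD []).length)).map (fun c =>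
          pvCell T di i (c / ((T.headD []).headD []).length) mi
            (c % ((T.headD []).headD []).length))) := by
    intro i hi
    rw [List.mem_range] at hi
    have hmemrow : di.getD i [] ∈ di := by
      rw [List.getD_eq_getElem _ _ hi]; exact List.getElem_mem _
    rw [pvTake_eq_range_map _ _ (hrows _ hmemrow)]
    apply List.map_congr_left
    intro mi _
    rw [List.flatMap_map]
    exact pvFlatMap_range_mul _ _ (fun j mj => pvCell T di i j mi mj)
  rw [List.flatMap_def, List.map_congr_left step, ← List.flatMap_def]
  rw [pvFlatMap_range_mul _ _ (fun i mi =>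
    (List.range ((di.headD []).length * ((T.headD []).headD []).length)).map (fun c =>
      pvCell T di i (c / ((T.headD []).headD []).length) mi (c % ((T.headD []).headD []).length)))]
  rfl

-- ===== VERDICT (by name: the statement is the Claim_ definition above) =====
theorem create_block_matrix_spec : Claim_equal_create_block_matrix := by
  intro T di _ hpre
  unfold Spec_create_block_matrix
  rw [pvA_char, pvB_char T di hpre.2.2.2.1]
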